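-- pv_equiv track=rewrite | github.com/hieu-delta/Cloud-Work | Python/CodePTIT/PY01043.py | check
-- ===== SOURCE A (Python) =====
-- def check(s):
--     s = str(s)
--     if (len(s)%2 != 0):
--         return 0
--     for i in range(len(s)//2):
--         if (int(s[i])%2 != 0 or int(s[len(s)-1-i])%2 != 0 or s[i]!=s[len(s)-1-i]):
--             return 0
--     return 1
-- ===== SOURCE B (Python) =====
-- def check(s):
--     t = str(s)
--     if len(t) % 2 != 0:
--         return 0
--     if t == t[::-1] and all(int(c) % 2 == 0 for c in t):
--         return 1
--     return 0
-- ===== Notes on version B (the rewrite author's own statement) =====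
-- stated objective: idiomatic
-- what changed: Replaces the index-based half-length loop with per-pair short-circuit returns by a whole-string palindrome test (t == t[::-1]) plus an all()-even-digit check.
-- crash fix: On negative inputs whose str() has even length (odd digit count), A raises ValueError on int('-') while B returns 0 (the '-' makes the string a non-palindrome before any int() is evaluated). — e.g. on check(-123): A raises ValueError, B returns 0
import Mathlib
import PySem

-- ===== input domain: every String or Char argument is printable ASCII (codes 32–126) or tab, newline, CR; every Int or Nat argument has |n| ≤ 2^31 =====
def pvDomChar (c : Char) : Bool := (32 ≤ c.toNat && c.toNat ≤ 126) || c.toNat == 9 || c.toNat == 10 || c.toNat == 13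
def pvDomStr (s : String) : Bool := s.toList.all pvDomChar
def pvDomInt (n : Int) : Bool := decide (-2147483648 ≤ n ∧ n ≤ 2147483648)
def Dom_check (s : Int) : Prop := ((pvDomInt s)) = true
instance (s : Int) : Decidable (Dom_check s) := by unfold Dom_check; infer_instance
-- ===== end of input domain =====

-- B replaces A's index-based half-length loop by an idiomatic palindrome test plus an all()-even-digit check; equal cost.

-- ===== PORT A =====
-- int(c) for a one-character string; .getD 0 is never reached inside Pre_check (ValueError excluded there)
def pvDigitVal (c : Char) : Int := (PySem.Int.ofStr? (String.mk [c])).getD 0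

-- the for-loop of A: fuel = remaining iterations, i = current index (indices are in range, so List.getD is exact)
def pvLoopA (t : List Char) : Nat → Nat → Int
  | _, 0 => 1
  | i, fuel + 1 =>
    if pvDigitVal (t.getD i ' ') % 2 ≠ 0 ∨ pvDigitVal (t.getD (t.length - 1 - i) ' ') % 2 ≠ 0 ∨
        t.getD i ' ' ≠ t.getD (t.length - 1 - i) ' ' then 0
    else pvLoopA t (i + 1) fuel

def check (s : Int) : Int :=
  let t := (PySem.Int.toStr s).toList
  if t.length % 2 ≠ 0 then 0
  else pvLoopA t 0 (t.length / 2)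

-- ===== PORT B =====
def check_alt (s : Int) : Int :=
  let t := (PySem.Int.toStr s).toList
  if t.length % 2 ≠ 0 then 0
  else if t = t.reverse ∧ t.all (fun c => pvDigitVal c % 2 == 0) then 1 else 0

-- ===== PRECONDITION & SPEC =====
-- Pre_ excludes exactly the inputs where Python A raises ValueError: negative s whose str() has even
-- length (the '-' sign reaches int() there). A returns normally on every other input.
def Pre_check (s : Int) : Prop := 0 ≤ s ∨ (PySem.Int.toStr s).toList.length % 2 = 1
instance (s : Int) : Decidable (Pre_check s) := by unfold Pre_check; infer_instance
def pvWitness_check : Int := 2442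

-- On negative s whose str() has even length A raises ValueError on int('-'); B returns 0, since the
-- leading '-' already makes the string a non-palindrome before any int() is evaluated.
def Raises_check (s : Int) : Prop := s < 0 ∧ (PySem.Int.toStr s).toList.length % 2 = 0
instance (s : Int) : Decidable (Raises_check s) := by unfold Raises_check; infer_instance
def pvRaiseWitness_check : Int := -123
def pvRaiseWitnessOut_check : Int := 0

def Spec_check (s : Int) (out : Int) : Prop := out = check_alt s
instance (s : Int) (out : Int) : Decidable (Spec_check s out) := by unfold Spec_check; infer_instance

-- ===== CLAIM (what is proved, stated in full; the proofs are below) =====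
def Claim_equal_check : Prop := ∀ (s : Int), Dom_check s → Pre_check s → Spec_check s (check s)
def Claim_raises_check : Prop := (∀ (s : Int), Dom_check s → Raises_check s → ¬ Pre_check s) ∧
  (Dom_check (pvRaiseWitness_check) ∧ Raises_check (pvRaiseWitness_check) ∧ check_alt (pvRaiseWitness_check) = pvRaiseWitnessOut_check)

-- ===== LEMMAS AND PROOFS =====

-- one pair-check of A's loop body, as a Prop
def pvGood (t : List Char) (j : Nat) : Prop :=
  pvDigitVal (t.getD j ' ') % 2 = 0 ∧ pvDigitVal (t.getD (t.length - 1 - j) ' ') % 2 = 0 ∧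
    t.getD j ' ' = t.getD (t.length - 1 - j) ' '

theorem pvLoopA_zero_or_one (t : List Char) (fuel i : Nat) :
    pvLoopA t i fuel = 0 ∨ pvLoopA t i fuel = 1 := by
  induction fuel generalizing i with
  | zero => right; rfl
  | succ n ih =>
    rw [pvLoopA]
    split
    · left; rfl
    · exact ih (i + 1)

theorem pvLoopA_eq_one_iff (t : List Char) (fuel i : Nat) :
    pvLoopA t i fuel = 1 ↔ ∀ j, j < fuel → pvGood t (i + j) := by
  induction fuel generalizing i with
  | zero => simp [pvLoopA]
  | succ n ih =>
    rw [pvLoopA]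
    by_cases hbad : pvDigitVal (t.getD i ' ') % 2 ≠ 0 ∨
        pvDigitVal (t.getD (t.length - 1 - i) ' ') % 2 ≠ 0 ∨
        t.getD i ' ' ≠ t.getD (t.length - 1 - i) ' '
    · rw [if_pos hbad]
      constructor
      · intro h; exact absurd h (by decide)
      · intro hc
        have hg := hc 0 (by omega)
        unfold pvGood at hg
        simp only [Nat.add_zero] at hg
        rcases hbad with h | h | h
        · exact absurd hg.1 h
        · exact absurd hg.2.1 h
        · exact absurd hg.2.2 h
    · rw [if_neg hbad]
      push_neg at hbad
      obtain ⟨h1, h2, h3⟩ := hbad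
      rw [ih]
      constructor
      · intro hall j hj
        match j, hj with
        | 0, _ => exact ⟨h1, h2, h3⟩
        | j + 1, hj =>
          have := hall j (by omega)
          simpa [Nat.add_comm, Nat.add_left_comm] using this
      · intro hall j hj
        have := hall (j + 1) (by omega)
        simpa [Nat.add_comm, Nat.add_left_comm] using this

theorem pvHalf_iff (t : List Char) (he : t.length % 2 = 0) :
    (∀ j, j < t.length / 2 → pvGood t j) ↔
      (t = t.reverse ∧ t.all (fun c => pvDigitVal c % 2 == 0) = true) := by
  constructor
  · intro H
    have hpal : ∀ k (hk : k < t.length), t[k] = t[t.length - 1 - k] := by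
      intro k hk
      by_cases hlt : k < t.length / 2
      · have := (H k hlt).2.2
        rwa [List.getD_eq_getElem t ' ' hk, List.getD_eq_getElem t ' ' (by omega)] at this
      · have hk2 : t.length - 1 - k < t.length / 2 := by omega
        have := (H _ hk2).2.2
        rw [List.getD_eq_getElem t ' ' (by omega), List.getD_eq_getElem t ' ' (by omega)] at this
        have hrew : t.length - 1 - (t.length - 1 - k) = k := by omega
        simp only [hrew] at this
        exact this.symm
    refine ⟨?_, ?_⟩
    · apply List.ext_getElem (by simp)
      intro k h1 h2
      rw [List.getElem_reverse]
      exact hpal k h1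
    · rw [List.all_eq_true]
      intro c hc
      obtain ⟨k, hk, rfl⟩ := List.mem_iff_getElem.mp hc
      by_cases hlt : k < t.length / 2
      · have := (H k hlt).1
        rw [List.getD_eq_getElem t ' ' hk] at this
        simpa using this
      · have hk2 : t.length - 1 - k < t.length / 2 := by omega
        have := (H _ hk2).2.1
        rw [List.getD_eq_getElem t ' ' (by omega)] at this
        have hrew : t.length - 1 - (t.length - 1 - k) = k := by omega
        simp only [hrew] at this
        simpa using this
  · rintro ⟨hpal, hall⟩
    rw [List.all_eq_true] at hall
    intro j hj
    have hj1 : j < t.length := by omega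
    have hj2 : t.length - 1 - j < t.length := by omega
    have hv : ∀ k (hk : k < t.length), pvDigitVal t[k] % 2 = 0 := by
      intro k hk
      have := hall t[k] (List.getElem_mem hk)
      simpa using this
    have hpk : t[j] = t[t.length - 1 - j] := by
      have h1 : t[j] = t.reverse[j]'(by simpa using hj1) := List.getElem_of_eq hpal hj1
      rw [h1, List.getElem_reverse]
    refine ⟨?_, ?_, ?_⟩
    · rw [List.getD_eq_getElem t ' ' hj1]; exact hv j hj1
    · rw [List.getD_eq_getElem t ' ' hj2]; exact hv _ hj2
    · rw [List.getD_eq_getElem t ' ' hj1, List.getD_eq_getElem t ' ' hj2]; exact hpk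

-- ===== VERDICT (by name: the statement is the Claim_ definition above) =====
theorem check_spec : Claim_equal_check := by
  intro s _ _
  unfold Spec_check check check_alt
  set t := (PySem.Int.toStr s).toList with ht
  by_cases hodd : t.length % 2 ≠ 0
  · simp [hodd]
  · push_neg at hodd
    rw [if_neg (by omega), if_neg (by omega)]
    by_cases hcond : t = t.reverse ∧ t.all (fun c => pvDigitVal c % 2 == 0) = true
    · rw [if_pos hcond]
      rw [pvLoopA_eq_one_iff]
      intro j hj
      simpa using (pvHalf_iff t hodd).mpr hcond j (by omega)
    · rw [if_neg hcond]
      rcases pvLoopA_zero_or_one t (t.length / 2) 0 with h | h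
      · exact h
      · exact absurd ((pvHalf_iff t hodd).mp (by
          intro j hj
          simpa using (pvLoopA_eq_one_iff t (t.length / 2) 0).mp h j hj)) hcond

theorem check_raises : Claim_raises_check := by
  unfold Claim_raises_check
  constructor
  · intro s _ hr hp
    obtain ⟨h1, h2⟩ := hr
    rcases hp with h | h
    · omega
    · omega
  · refine ⟨by decide, by decide, by decide⟩

-- self-check: the raise-witness value stated in pvRaiseWitnessOut_check, read back from check_raises
theorem pvRaiseWitnessValue_ok : check_alt pvRaiseWitness_check = pvRaiseWitnessOut_check := by
  have h := check_raises
  unfold Claim_raises_check at h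
  exact h.2.2.2
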